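-- pv_equiv track=rewrite | github.com/agateau/ctall | ctall/textdrawer.py | _compute_text_size
-- ===== SOURCE A (Python) =====
-- def _compute_text_size(text):
--     rows = 1
--     widest_column = 0
--     column = 0
--     for char in text:
--         if char == "\n":
--             rows += 1
--             widest_column = max(column, widest_column)
--             column = 0
--         else:
--             column += 1
--     widest_column = max(column, widest_column)
--     return widest_column, rows
-- ===== SOURCE B (Python) =====
-- def _compute_text_size(text):
--     lines = text.split("\n")
--     return max(len(line) for line in lines), len(lines)
-- ===== Notes on version B (the rewrite author's own statement) =====
-- stated objective: idiomatic
-- what changed: Replaces A's character-by-character state machine (rows/widest_column/column counters) by splitting the text on newline and reducing over the list of lines: width = max line length, height = number of lines.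
import Mathlib
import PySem

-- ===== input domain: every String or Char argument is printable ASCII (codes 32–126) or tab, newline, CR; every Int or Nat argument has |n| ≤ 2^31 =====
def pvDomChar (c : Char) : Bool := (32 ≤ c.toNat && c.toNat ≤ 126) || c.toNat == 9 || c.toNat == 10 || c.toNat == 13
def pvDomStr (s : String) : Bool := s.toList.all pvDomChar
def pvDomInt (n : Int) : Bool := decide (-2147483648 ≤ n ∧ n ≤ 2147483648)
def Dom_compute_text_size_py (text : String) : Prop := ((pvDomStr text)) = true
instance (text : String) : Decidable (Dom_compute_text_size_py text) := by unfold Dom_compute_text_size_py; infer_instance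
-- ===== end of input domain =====

-- B replaces A's per-character state machine by splitting on "\n" and reducing over the lines (idiomatic; same O(n) cost).


-- ===== PORT A =====
-- state (rows, widest_column, column), exactly A's loop
def compute_text_size_py (text : String) : Int × Int :=
  let st := text.toList.foldl
    (fun (st : Int × Int × Int) char =>
      if char = '\n' then (st.1 + 1, max st.2.2 st.2.1, 0)
      else (st.1, st.2.1, st.2.2 + 1))
    (1, 0, 0)
  (max st.2.2 st.2.1, st.1)

-- ===== PORT B =====
-- lines = text.split("\n"); return max(len(line) for line in lines), len(lines)
def compute_text_size_py_alt (text : String) : Int × Int :=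
  match PySem.Str.split? text "\n" with
  | some lines =>
      ((PySem.List.max? (lines.map PySem.Str.len) (fun y => y)).getD 0,
       PySem.List.len lines)
  | none => (0, 0)   -- unreachable totality guard: the separator "\n" is nonempty

-- ===== PRECONDITION & SPEC =====
def Spec_compute_text_size_py (text : String) (out : Int × Int) : Prop := out = compute_text_size_py_alt text
instance (text : String) (out : Int × Int) : Decidable (Spec_compute_text_size_py text out) := by unfold Spec_compute_text_size_py; infer_instance

-- ===== CLAIM (what is proved, stated in full; the proofs are below) =====
def Claim_equal_compute_text_size_py : Prop := ∀ (text : String), Dom_compute_text_size_py text → Spec_compute_text_size_py text (compute_text_size_py text)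

-- ===== LEMMAS AND PROOFS =====

-- structural model of text.split("\n") at the character level
def spNL : List Char → List (List Char)
  | [] => [[]]
  | x :: xs => if x = '\n' then [] :: spNL xs else (spNL xs).modifyHead (fun h => x :: h)

theorem spNL_ne_nil (l : List Char) : spNL l ≠ [] := by
  induction l with
  | nil => simp [spNL]
  | cons x xs ih =>
    simp only [spNL]
    split
    · simp
    · cases h : spNL xs with
      | nil => exact absurd h ih
      | cons q qs => simp [h]

-- A's "widest column" computation, re-run over the list of lines
def wmax : List (List Char) → Int → Int → Int
  | [], w, c => max c w
  | [p], w, c => max (c + (p.length : Int)) w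
  | p :: q :: ps, w, c => wmax (q :: ps) (max (c + (p.length : Int)) w) 0

theorem go_spNL (fuel : Nat) : ∀ (l cur acc : List Char) (accs : List (List Char)),
    l.length < fuel →
    PySem.Chars.splitOn.go ['\n'] fuel l cur accs =
      accs.reverse ++ (spNL l).modifyHead (fun h => cur.reverse ++ h) := by
  induction fuel with
  | zero => intro l cur acc accs h; omega
  | succ n ih =>
    intro l cur acc accs h
    cases l with
    | nil =>
      simp [PySem.Chars.splitOn.go, spNL]
    | cons c rest =>
      rw [PySem.Chars.splitOn.go]
      by_cases hc : c = '\n'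
      · subst hc
        simp only [List.isPrefixOf, beq_self_eq_true, List.isPrefixOf_nil_left,
          Bool.and_self, if_true, List.length_cons, List.length_nil, List.drop_succ_cons,
          List.drop_zero]
        rw [ih rest [] acc (cur.reverse :: accs) (by simpa using Nat.lt_of_succ_lt_succ h)]
        cases hs : spNL rest with
        | nil => exact absurd hs (spNL_ne_nil rest)
        | cons q qs => simp [spNL, hs]
      · have hpre : (['\n'].isPrefixOf (c :: rest)) = false := by
          simp [List.isPrefixOf, hc]
          exact fun he => hc he.symm
        rw [hpre]
        simp only [Bool.false_eq_true, if_false]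
        rw [ih rest (c :: cur) acc accs (by simpa using Nat.lt_of_succ_lt_succ h)]
        cases hs : spNL rest with
        | nil => exact absurd hs (spNL_ne_nil rest)
        | cons q qs => simp [spNL, hs, hc]

theorem splitOn_eq_spNL (l : List Char) :
    PySem.Chars.splitOn l ['\n'] = spNL l := by
  rw [PySem.Chars.splitOn, go_spNL (l.length + 1) l [] [] [] (by omega)]
  cases hs : spNL l with
  | nil => exact absurd hs (spNL_ne_nil l)
  | cons q qs => simp

theorem keyA (l : List Char) : ∀ (r w c : Int),
    (let st := l.foldl
        (fun (st : Int × Int × Int) char =>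
          if char = '\n' then (st.1 + 1, max st.2.2 st.2.1, 0)
          else (st.1, st.2.1, st.2.2 + 1))
        (r, w, c)
     (max st.2.2 st.2.1, st.1))
      = (wmax (spNL l) w c, r + ((spNL l).length : Int) - 1) := by
  induction l with
  | nil => intro r w c; simp [spNL, wmax]
  | cons x xs ih =>
    intro r w c
    by_cases hx : x = '\n'
    · subst hx
      simp only [List.foldl_cons, if_true]
      rw [ih (r + 1) (max c w) 0]
      cases hs : spNL xs with
      | nil => exact absurd hs (spNL_ne_nil xs)
      | cons q qs =>
        simp only [spNL, if_true, hs, wmax, List.length_cons]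
        simp only [Prod.mk.injEq]
        refine ⟨by norm_num, by push_cast; ring⟩
    · simp only [List.foldl_cons, if_neg hx]
      rw [ih r w (c + 1)]
      cases hs : spNL xs with
      | nil => exact absurd hs (spNL_ne_nil xs)
      | cons q qs =>
        simp only [spNL, if_neg hx, hs, List.modifyHead_cons]
        cases qs with
        | nil =>
          simp only [wmax, List.length_cons, Prod.mk.injEq]
          have harg : (c + 1 + (q.length : Int)) = c + ((q.length : Nat) + 1 : Nat) := by
            push_cast; ring
          rw [harg]
          exact ⟨rfl, trivial⟩
        | cons q2 qs2 =>
          simp only [wmax, List.length_cons, Prod.mk.injEq]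
          have harg : (c + 1 + (q.length : Int)) = c + ((q.length : Nat) + 1 : Nat) := by
            push_cast; ring
          rw [harg]
          exact ⟨rfl, trivial⟩

theorem wmax_eq_foldl (ls : List (List Char)) : ∀ (w : Int),
    ls ≠ [] → wmax ls w 0 = (ls.map (fun p => (p.length : Int))).foldl max w := by
  induction ls with
  | nil => intro w h; exact absurd rfl h
  | cons p ps ih =>
    intro w _
    cases ps with
    | nil => simp [wmax]; omega
    | cons q qs =>
      have harg : max (0 + (p.length : Int)) w = max w (p.length : Int) := by omega
      calc wmax (p :: q :: qs) w 0
          = wmax (q :: qs) (max (0 + (p.length : Int)) w) 0 := rfl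
        _ = wmax (q :: qs) (max w (p.length : Int)) 0 := by rw [harg]
        _ = ((q :: qs).map (fun p => (p.length : Int))).foldl max (max w (p.length : Int)) :=
            ih (max w (p.length : Int)) (by simp)
        _ = ((p :: q :: qs).map (fun p => (p.length : Int))).foldl max w := rfl

theorem compute_text_size_py_spec : Claim_equal_compute_text_size_py := by
  intro text _
  unfold Spec_compute_text_size_py compute_text_size_py compute_text_size_py_alt
  have hsplit : PySem.Str.split? text "\n" =
      some ((spNL text.toList).map String.ofList) := by
    unfold PySem.Str.split?
    have : PySem.Chars.split? text.toList "\n".toList =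
        some (spNL text.toList) := by
      unfold PySem.Chars.split?
      have : ("\n".toList) = ['\n'] := by decide
      rw [this]
      simp [splitOn_eq_spNL]
    rw [this]
    rfl
  rw [hsplit]
  simp only []
  rw [keyA text.toList 1 0 0]
  cases hs : spNL text.toList with
  | nil => exact absurd hs (spNL_ne_nil text.toList)
  | cons q qs =>
    have hmap : ((q :: qs).map String.ofList).map PySem.Str.len
        = (q :: qs).map (fun p => (p.length : Int)) := by
      simp [PySem.Str.len, String.toList_ofList]
    simp only [Prod.mk.injEq]
    refine ⟨?_, ?_⟩
    · rw [wmax_eq_foldl (q :: qs) 0 (by simp), hmap]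
      simp only [List.map_cons]
      rw [PySem.List.max?_id_cons]
      simp only [Option.getD_some, List.foldl_cons]
      simp [max_eq_right (Int.natCast_nonneg q.length)]
    · simp [PySem.List.len]
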